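-- pv_equiv track=rewrite | github.com/theVikingMan/LeetCode | LC/LeetCode_2214_MinHealthtoBeatGame.py | minimumHealth
-- ===== SOURCE A (Python) =====
-- def minimumHealth(damage, armor):
--   maxDam, sumDam = max(damage), sum(damage) + 1
--   l, r = 0, sumDam
--
--   while l <= r:
--     hasArmor = True
--     currHealth = (l + r) // 2
--     for d in damage:
--       if d == maxDam and hasArmor:
--         currHealth -= (max(d - armor, 0))
--         hasArmor = False
--       else:
--         currHealth -= d
--
--     if currHealth < 1:
--       l = (l + r) // 2 + 1
--     elif currHealth > 1:
--       r = (l + r) // 2 - 1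
--     else:
--       return (l + r) // 2
-- ===== SOURCE B (Python) =====
-- def minimumHealth(damage, armor):
--   return sum(damage) - min(max(damage), armor) + 1
-- ===== Notes on version B (the rewrite author's own statement) =====
-- stated objective: simpler
-- what changed: Replaced the binary search (each probe re-scanning the whole damage list) by the closed form sum(damage) - min(max(damage), armor) + 1, computed in one pass.
-- outside the precondition, e.g. on minimumHealth([-3, 5], 10): A returns None, B returns -2; on minimumHealth([5], -2): A returns None, B returns 8
import Mathlib
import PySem

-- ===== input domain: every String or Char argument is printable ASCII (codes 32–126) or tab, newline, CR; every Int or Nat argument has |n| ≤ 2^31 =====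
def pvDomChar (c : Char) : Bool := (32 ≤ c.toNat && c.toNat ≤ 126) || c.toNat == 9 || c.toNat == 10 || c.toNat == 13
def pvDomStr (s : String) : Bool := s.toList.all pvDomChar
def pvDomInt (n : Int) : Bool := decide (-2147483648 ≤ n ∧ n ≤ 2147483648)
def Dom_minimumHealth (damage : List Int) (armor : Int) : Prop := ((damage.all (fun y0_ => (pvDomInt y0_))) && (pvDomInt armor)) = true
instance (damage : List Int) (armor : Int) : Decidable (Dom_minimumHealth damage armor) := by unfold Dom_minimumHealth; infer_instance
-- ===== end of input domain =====

-- B replaces A's binary search (each probe re-scanning the list) by the closed form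
-- sum(damage) - min(max(damage), armor) + 1; equivalence of RETURN values on Pre_.

-- ===== PORT A =====
-- inner for-loop body: state = (currHealth, hasArmor)
def pvLoopBody (armor maxDam : Int) (st : Int × Bool) (d : Int) : Int × Bool :=
  if d = maxDam ∧ st.2 = true then (st.1 - max (d - armor) 0, false) else (st.1 - d, st.2)

-- the while-loop of A; falls off the loop (A returns None) → junk value 0, excluded by Pre_
def pvSearch (damage : List Int) (armor maxDam : Int) (l r : Int) : Int :=
  if h : l ≤ r then
    let mid := PySem.Int.floordiv (l + r) 2
    let curr := (damage.foldl (pvLoopBody armor maxDam) (mid, true)).1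
    if curr < 1 then pvSearch damage armor maxDam (mid + 1) r
    else if curr > 1 then pvSearch damage armor maxDam l (mid - 1)
    else mid
  else 0
termination_by (r + 1 - l).toNat
decreasing_by
  · have hb := PySem.Int.floordiv_two_mid_bounds h; omega
  · have hb := PySem.Int.floordiv_two_mid_bounds h; omega

def minimumHealth (damage : List Int) (armor : Int) : Int :=
  match PySem.List.max? damage (fun y => y) with
  | none => 0   -- max([]) raises ValueError; excluded by Pre_
  | some maxDam => pvSearch damage armor maxDam 0 (damage.sum + 1)

-- ===== PORT B =====
def minimumHealth_alt (damage : List Int) (armor : Int) : Int :=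
  match PySem.List.max? damage (fun y => y) with
  | none => 0   -- max([]) raises ValueError; excluded by Pre_
  | some m => damage.sum - min m armor + 1

-- ===== PRECONDITION & SPEC =====
-- Pre_ excludes the empty list (max([]) raises ValueError in both programs) and the
-- inputs on which A's binary search exhausts its range and A returns None (not an int):
-- exactly those where the sought value sum - min(max, armor) + 1 lies outside [0, sum+1],
-- which can only happen with negative damage values or negative armor.
def Pre_minimumHealth (damage : List Int) (armor : Int) : Prop :=
  damage ≠ [] ∧
  0 ≤ min (damage.foldl max (damage.headD 0)) armor ∧
  min (damage.foldl max (damage.headD 0)) armor ≤ damage.sum + 1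

instance (damage : List Int) (armor : Int) : Decidable (Pre_minimumHealth damage armor) := by
  unfold Pre_minimumHealth; infer_instance

def pvWitness_minimumHealth : List Int × Int := ([2, 7, 4, 3], 4)

def Spec_minimumHealth (damage : List Int) (armor : Int) (out : Int) : Prop := out = minimumHealth_alt damage armor
instance (damage : List Int) (armor : Int) (out : Int) : Decidable (Spec_minimumHealth damage armor out) := by unfold Spec_minimumHealth; infer_instance

-- ===== CLAIM (what is proved, stated in full; the proofs are below) =====
def Claim_equal_minimumHealth : Prop := ∀ (damage : List Int) (armor : Int), Dom_minimumHealth damage armor → Pre_minimumHealth damage armor → Spec_minimumHealth damage armor (minimumHealth damage armor)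

-- ===== LEMMAS AND PROOFS =====

-- after the armor is spent the inner loop just subtracts the remaining damage
theorem pvLoop_false (armor m : Int) (ds : List Int) (h : Int) :
    ds.foldl (pvLoopBody armor m) (h, false) = (h - ds.sum, false) := by
  induction ds generalizing h with
  | nil => simp
  | cons d ds ih =>
      have hstep : pvLoopBody armor m (h, false) d = (h - d, false) := by simp [pvLoopBody]
      rw [List.foldl_cons, hstep, ih]
      simp only [List.sum_cons, Prod.mk.injEq]
      exact ⟨by ring, trivial⟩

-- with the armor intact and m occurring in the list, the loop subtracts sum - m + max(m-armor,0)
theorem pvLoop_true (armor m : Int) (ds : List Int) (hm : m ∈ ds) (h : Int) :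
    ds.foldl (pvLoopBody armor m) (h, true) = (h - (ds.sum - m + max (m - armor) 0), false) := by
  induction ds generalizing h with
  | nil => cases hm
  | cons d ds ih =>
      by_cases hd : d = m
      · have hstep : pvLoopBody armor m (h, true) d = (h - max (d - armor) 0, false) := by
          simp [pvLoopBody, hd]
        rw [List.foldl_cons, hstep, pvLoop_false]
        simp only [List.sum_cons, Prod.mk.injEq]
        subst hd
        exact ⟨by ring, trivial⟩
      · have hm' : m ∈ ds := by cases hm with
          | head => exact absurd rfl hd
          | tail _ h => exact h
        have hstep : pvLoopBody armor m (h, true) d = (h - d, true) := by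
          simp [pvLoopBody, hd]
        rw [List.foldl_cons, hstep, ih hm']
        simp only [List.sum_cons, Prod.mk.injEq]
        exact ⟨by ring, trivial⟩

-- binary-search correctness: if the target t is in [l, r], pvSearch finds it
theorem pvSearch_eq (damage : List Int) (armor m : Int) (hm : m ∈ damage) :
    ∀ (l r : Int), l ≤ damage.sum - min m armor + 1 → damage.sum - min m armor + 1 ≤ r →
      pvSearch damage armor m l r = damage.sum - min m armor + 1 := by
  intro l r hl hr
  have hlr : l ≤ r := le_trans hl hr
  have hb := PySem.Int.floordiv_two_mid_bounds hlr
  have hcurr : ∀ x : Int, (damage.foldl (pvLoopBody armor m) (x, true)).1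
      = x - (damage.sum - min m armor) := by
    intro x
    rw [pvLoop_true armor m damage hm x]
    simp only
    omega
  rw [pvSearch, dif_pos hlr]
  simp only [hcurr]
  set mid := PySem.Int.floordiv (l + r) 2 with hmid
  set t := damage.sum - min m armor + 1 with ht
  by_cases h1 : mid < t
  · rw [if_pos (by omega)]
    exact pvSearch_eq damage armor m hm (mid + 1) r (by omega) hr
  · by_cases h2 : t < mid
    · rw [if_neg (by omega), if_pos (by omega)]
      exact pvSearch_eq damage armor m hm l (mid - 1) hl (by omega)
    · rw [if_neg (by omega), if_neg (by omega)]; omega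
termination_by l r => (r + 1 - l).toNat
decreasing_by
  · omega
  · omega

-- ===== VERDICT (by name: the statement is the Claim_ definition above) =====
theorem minimumHealth_spec : Claim_equal_minimumHealth := by
  intro damage armor _ hpre
  cases damage with
  | nil => exact absurd hpre.1 (by simp)
  | cons d ds =>
      have hmax : PySem.List.max? (d :: ds) (fun y => y) = some (ds.foldl max d) :=
        PySem.List.max?_id_cons d ds
      have hm : ds.foldl max d ∈ (d :: ds) := PySem.List.max?_mem hmax
      obtain ⟨-, h0, h1⟩ := hpre
      have hfold : (d :: ds).foldl max ((d :: ds).headD 0) = ds.foldl max d := by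
        simp [List.foldl_cons]
      rw [hfold] at h0 h1
      show minimumHealth _ _ = minimumHealth_alt _ _
      rw [minimumHealth, minimumHealth_alt, hmax]
      exact pvSearch_eq (d :: ds) armor (ds.foldl max d) hm 0 ((d :: ds).sum + 1)
        (by omega) (by omega)
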